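-- pv_equiv track=rewrite | github.com/mnmohtasham/advanced-listdiff | app.py | process_lists
-- ===== SOURCE A (Python) =====
-- from collections import Counter
--
-- def process_lists(list_a, list_b, ignore_case, trim_spaces):
--     if trim_spaces:
--         list_a = [item.strip() for item in list_a]
--         list_b = [item.strip() for item in list_b]
--
--     if ignore_case:
--         list_a = [item.lower() for item in list_a]
--         list_b = [item.lower() for item in list_b]
--
--     # Calculate duplicates on the normalized lists. This is the correct logic.
--     duplicates_a = [item for item, count in Counter(list_a).items() if count > 1]
--     duplicates_b = [item for item, count in Counter(list_b).items() if count > 1]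
--     set_a = set(list_a)
--     set_b = set(list_b)
--     return {
--         "intersection": sorted(list(set_a & set_b)),
--         "unique_to_a": sorted(list(set_a - set_b)),
--         "unique_to_b": sorted(list(set_b - set_a)),
--         "symmetric_difference": sorted(list(set_a ^ set_b)),
--         "union": sorted(list(set_a | set_b)),
--         "duplicates_a": sorted(duplicates_a),
--         "duplicates_b": sorted(duplicates_b)
--     }
-- ===== SOURCE B (Python) =====
-- from collections import Counter
--
-- def process_lists(list_a, list_b, ignore_case, trim_spaces):
--     def norm(xs):
--         if trim_spaces:
--             xs = [x.strip() for x in xs]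
--         if ignore_case:
--             xs = [x.lower() for x in xs]
--         return xs
--     cnt_a = Counter(norm(list_a))
--     cnt_b = Counter(norm(list_b))
--     # sort the distinct keys ONCE; every output is a scan of this sorted list
--     keys = sorted(cnt_a.keys() | cnt_b.keys())
--     return {
--         "intersection": [k for k in keys if k in cnt_a and k in cnt_b],
--         "unique_to_a": [k for k in keys if k in cnt_a and k not in cnt_b],
--         "unique_to_b": [k for k in keys if k not in cnt_a and k in cnt_b],
--         "symmetric_difference": [k for k in keys if (k in cnt_a) != (k in cnt_b)],
--         "union": keys,
--         "duplicates_a": [k for k in keys if cnt_a[k] > 1],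
--         "duplicates_b": [k for k in keys if cnt_b[k] > 1],
--     }
-- ===== Notes on version B (the rewrite author's own statement) =====
-- stated objective: alternative
-- what changed: Replaces A's five set operations and seven separate sorts with two Counters, one sort of the combined distinct keys, and membership/count scans of that single sorted key list.
import Mathlib
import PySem

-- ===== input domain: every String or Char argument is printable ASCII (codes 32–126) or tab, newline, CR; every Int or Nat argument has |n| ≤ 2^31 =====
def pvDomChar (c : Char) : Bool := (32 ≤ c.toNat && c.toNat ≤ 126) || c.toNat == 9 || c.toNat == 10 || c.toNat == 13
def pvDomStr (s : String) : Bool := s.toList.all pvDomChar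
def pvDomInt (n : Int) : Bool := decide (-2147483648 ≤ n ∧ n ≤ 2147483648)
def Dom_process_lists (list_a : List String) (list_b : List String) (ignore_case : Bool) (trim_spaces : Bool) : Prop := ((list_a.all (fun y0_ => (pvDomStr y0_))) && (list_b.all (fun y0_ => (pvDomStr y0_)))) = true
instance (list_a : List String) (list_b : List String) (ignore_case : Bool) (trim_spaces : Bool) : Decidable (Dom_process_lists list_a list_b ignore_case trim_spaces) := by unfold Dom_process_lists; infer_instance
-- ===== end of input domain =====

-- B replaces A's five set operations and seven sorts by one sort of the combined distinct keys plus membership/count scans (objective: alternative decomposition).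

-- ===== PORT A =====
def process_lists (list_a : List String) (list_b : List String) (ignore_case : Bool) (trim_spaces : Bool) : List (String × List String) :=
  let la := if trim_spaces then list_a.map (fun item => PySem.Str.strip item) else list_a
  let lb := if trim_spaces then list_b.map (fun item => PySem.Str.strip item) else list_b
  let la := if ignore_case then la.map (fun item => PySem.Str.lower item) else la
  let lb := if ignore_case then lb.map (fun item => PySem.Str.lower item) else lb
  let duplicates_a := ((PySem.Dict.counter la).items.filter (fun p => p.2 > 1)).map (fun p => p.1)
  let duplicates_b := ((PySem.Dict.counter lb).items.filter (fun p => p.2 > 1)).map (fun p => p.1)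
  let set_a := PySem.Set.ofList la
  let set_b := PySem.Set.ofList lb
  [("intersection", PySem.List.sorted (PySem.Set.inter set_a set_b) (fun x => x) false),
   ("unique_to_a", PySem.List.sorted (PySem.Set.diff set_a set_b) (fun x => x) false),
   ("unique_to_b", PySem.List.sorted (PySem.Set.diff set_b set_a) (fun x => x) false),
   ("symmetric_difference", PySem.List.sorted (PySem.Set.symmDiff set_a set_b) (fun x => x) false),
   ("union", PySem.List.sorted (PySem.Set.union set_a set_b) (fun x => x) false),
   ("duplicates_a", PySem.List.sorted duplicates_a (fun x => x) false),
   ("duplicates_b", PySem.List.sorted duplicates_b (fun x => x) false)]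

-- ===== PORT B =====
def pvNorm (xs : List String) (ignore_case : Bool) (trim_spaces : Bool) : List String :=
  let xs := if trim_spaces then xs.map (fun x => PySem.Str.strip x) else xs
  if ignore_case then xs.map (fun x => PySem.Str.lower x) else xs

def process_lists_alt (list_a : List String) (list_b : List String) (ignore_case : Bool) (trim_spaces : Bool) : List (String × List String) :=
  let cnt_a := PySem.Dict.counter (pvNorm list_a ignore_case trim_spaces)
  let cnt_b := PySem.Dict.counter (pvNorm list_b ignore_case trim_spaces)
  -- sort the distinct keys ONCE; every output is a scan of this sorted list
  let keys := PySem.List.sorted (PySem.Set.union (PySem.Set.ofList cnt_a.keys) cnt_b.keys) (fun x => x) false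
  [("intersection", keys.filter (fun k => cnt_a.contains k && cnt_b.contains k)),
   ("unique_to_a", keys.filter (fun k => cnt_a.contains k && !cnt_b.contains k)),
   ("unique_to_b", keys.filter (fun k => !cnt_a.contains k && cnt_b.contains k)),
   ("symmetric_difference", keys.filter (fun k => cnt_a.contains k != cnt_b.contains k)),
   ("union", keys),
   ("duplicates_a", keys.filter (fun k => cnt_a.getD k 0 > 1)),
   ("duplicates_b", keys.filter (fun k => cnt_b.getD k 0 > 1))]

-- ===== PRECONDITION & SPEC =====
def Spec_process_lists (list_a : List String) (list_b : List String) (ignore_case : Bool) (trim_spaces : Bool) (out : List (String × List String)) : Prop := out = process_lists_alt list_a list_b ignore_case trim_spaces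
instance (list_a : List String) (list_b : List String) (ignore_case : Bool) (trim_spaces : Bool) (out : List (String × List String)) : Decidable (Spec_process_lists list_a list_b ignore_case trim_spaces out) := by unfold Spec_process_lists; infer_instance

-- ===== CLAIM (what is proved, stated in full; the proofs are below) =====
def Claim_equal_process_lists : Prop := ∀ (list_a : List String) (list_b : List String) (ignore_case : Bool) (trim_spaces : Bool), Dom_process_lists list_a list_b ignore_case trim_spaces → Spec_process_lists list_a list_b ignore_case trim_spaces (process_lists list_a list_b ignore_case trim_spaces)

-- ===== LEMMAS AND PROOFS =====

-- The sorted combined key list of B, as a name for the proofs.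
-- keys = sorted(set(la) | set(lb)) is strictly increasing and Nodup; filtering it by p
-- yields exactly sorted(L) for any Nodup L whose membership is (∈ la ∨ ∈ lb) ∧ p.
theorem pv_filter_sorted_union (la lb : List String) (L : List String) (p : String → Bool)
    (hnd : L.Nodup)
    (hmem : ∀ x, x ∈ L ↔ ((x ∈ la ∨ x ∈ lb) ∧ p x = true)) :
    PySem.List.sorted L (fun x => x) false =
      (PySem.List.sorted (PySem.Set.union (PySem.Set.ofList la) (PySem.Set.ofList lb)) (fun x => x) false).filter p := by
  set U := PySem.Set.union (PySem.Set.ofList la) (PySem.Set.ofList lb) with hU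
  set keys := PySem.List.sorted U (fun x => x) false with hk
  have hperm : keys.Perm U := PySem.List.sorted_perm U (fun x => x) false
  have hndU : U.Nodup := PySem.Set.nodup_union _ _ (PySem.Set.nodup_ofList la)
  have hndk : keys.Nodup := hperm.nodup_iff.mpr hndU
  have hle : keys.Pairwise (fun a b => a ≤ b) := PySem.List.sorted_pairwise U (fun x => x)
  have hlt : keys.Pairwise (fun a b => a < b) :=
    (hle.and hndk).imp (fun h => lt_of_le_of_ne h.1 h.2)
  have hmemk : ∀ x, x ∈ keys ↔ (x ∈ la ∨ x ∈ lb) := by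
    intro x
    rw [hperm.mem_iff, hU, PySem.Set.mem_union, PySem.Set.mem_ofList, PySem.Set.mem_ofList]
  apply PySem.List.sorted_eq_of_perm_of_pairwise_lt
  · refine (List.perm_ext_iff_of_nodup (hndk.filter p) hnd).mpr ?_
    intro x
    rw [List.mem_filter, hmem x, hmemk x]
  · exact hlt.filter p

theorem pv_dup_list (l : List String) :
    ((PySem.Dict.counter l).items.filter (fun p => p.2 > 1)).map (fun p => p.1) =
      (PySem.Set.ofList l).filter (fun k => (l.count k : Int) > 1) := by
  rw [PySem.Dict.items_counter, List.filter_map, List.map_map]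
  simp [Function.comp_def]

theorem process_lists_eq (list_a list_b : List String) (ignore_case trim_spaces : Bool) :
    process_lists list_a list_b ignore_case trim_spaces =
      process_lists_alt list_a list_b ignore_case trim_spaces := by
  unfold process_lists process_lists_alt pvNorm
  dsimp only
  set la := (if ignore_case then (if trim_spaces then list_a.map (fun item => PySem.Str.strip item) else list_a).map (fun item => PySem.Str.lower item) else (if trim_spaces then list_a.map (fun item => PySem.Str.strip item) else list_a)) with hla
  set lb := (if ignore_case then (if trim_spaces then list_b.map (fun item => PySem.Str.strip item) else list_b).map (fun item => PySem.Str.lower item) else (if trim_spaces then list_b.map (fun item => PySem.Str.strip item) else list_b)) with hlb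
  rw [PySem.Dict.keys_counter la, PySem.Dict.keys_counter lb,
      PySem.Set.ofList_eq_self_of_nodup _ (PySem.Set.nodup_ofList la)]
  have hc' : ∀ (l : List String) (x : String),
      (PySem.Dict.counter l).contains x = decide (x ∈ l) := by
    intro l x
    rw [PySem.Dict.contains_counter, List.contains_eq_mem]
  have hcount : ∀ (l : List String) (x : String),
      (PySem.Dict.counter l).getD x 0 = (l.count x : Int) := PySem.Dict.getD_counter
  have h1 : PySem.List.sorted (PySem.Set.inter (PySem.Set.ofList la) (PySem.Set.ofList lb)) (fun x => x) false =
      (PySem.List.sorted (PySem.Set.union (PySem.Set.ofList la) (PySem.Set.ofList lb)) (fun x => x) false).filter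
        (fun k => (PySem.Dict.counter la).contains k && (PySem.Dict.counter lb).contains k) := by
    apply pv_filter_sorted_union la lb _ _ (PySem.Set.nodup_inter _ _ (PySem.Set.nodup_ofList la))
    intro x
    simp only [PySem.Set.mem_inter, PySem.Set.mem_ofList, hc', Bool.and_eq_true, decide_eq_true_eq]
    tauto
  have h2 : PySem.List.sorted (PySem.Set.diff (PySem.Set.ofList la) (PySem.Set.ofList lb)) (fun x => x) false =
      (PySem.List.sorted (PySem.Set.union (PySem.Set.ofList la) (PySem.Set.ofList lb)) (fun x => x) false).filter
        (fun k => (PySem.Dict.counter la).contains k && !(PySem.Dict.counter lb).contains k) := by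
    apply pv_filter_sorted_union la lb _ _ (PySem.Set.nodup_diff _ _ (PySem.Set.nodup_ofList la))
    intro x
    simp only [PySem.Set.mem_diff, PySem.Set.mem_ofList, hc', Bool.and_eq_true, Bool.not_eq_true',
      decide_eq_true_eq, decide_eq_false_iff_not]
    tauto
  have h3 : PySem.List.sorted (PySem.Set.diff (PySem.Set.ofList lb) (PySem.Set.ofList la)) (fun x => x) false =
      (PySem.List.sorted (PySem.Set.union (PySem.Set.ofList la) (PySem.Set.ofList lb)) (fun x => x) false).filter
        (fun k => !(PySem.Dict.counter la).contains k && (PySem.Dict.counter lb).contains k) := by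
    apply pv_filter_sorted_union la lb _ _ (PySem.Set.nodup_diff _ _ (PySem.Set.nodup_ofList lb))
    intro x
    simp only [PySem.Set.mem_diff, PySem.Set.mem_ofList, hc', Bool.and_eq_true, Bool.not_eq_true',
      decide_eq_true_eq, decide_eq_false_iff_not]
    tauto
  have h4 : PySem.List.sorted (PySem.Set.symmDiff (PySem.Set.ofList la) (PySem.Set.ofList lb)) (fun x => x) false =
      (PySem.List.sorted (PySem.Set.union (PySem.Set.ofList la) (PySem.Set.ofList lb)) (fun x => x) false).filter
        (fun k => (PySem.Dict.counter la).contains k != (PySem.Dict.counter lb).contains k) := by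
    apply pv_filter_sorted_union la lb _ _
      (PySem.Set.nodup_symmDiff _ _ (PySem.Set.nodup_ofList la) (PySem.Set.nodup_ofList lb))
    intro x
    simp only [PySem.Set.mem_symmDiff, PySem.Set.mem_ofList, hc', bne_iff_ne, ne_eq,
      decide_eq_decide]
    tauto
  have h6 : PySem.List.sorted (((PySem.Dict.counter la).items.filter (fun p => p.2 > 1)).map (fun p => p.1)) (fun x => x) false =
      (PySem.List.sorted (PySem.Set.union (PySem.Set.ofList la) (PySem.Set.ofList lb)) (fun x => x) false).filter
        (fun k => (PySem.Dict.counter la).getD k 0 > 1) := by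
    rw [pv_dup_list la]
    apply pv_filter_sorted_union la lb _ _ ((PySem.Set.nodup_ofList la).filter _)
    intro x
    simp only [List.mem_filter, PySem.Set.mem_ofList, decide_eq_true_eq, hcount]
    constructor
    · rintro ⟨h, hc⟩
      exact ⟨Or.inl h, hc⟩
    · rintro ⟨_, hc⟩
      have hn : 1 < la.count x := by exact_mod_cast hc
      exact ⟨List.count_pos_iff.mp (by omega), hc⟩
  have h7 : PySem.List.sorted (((PySem.Dict.counter lb).items.filter (fun p => p.2 > 1)).map (fun p => p.1)) (fun x => x) false =
      (PySem.List.sorted (PySem.Set.union (PySem.Set.ofList la) (PySem.Set.ofList lb)) (fun x => x) false).filter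
        (fun k => (PySem.Dict.counter lb).getD k 0 > 1) := by
    rw [pv_dup_list lb]
    apply pv_filter_sorted_union la lb _ _ ((PySem.Set.nodup_ofList lb).filter _)
    intro x
    simp only [List.mem_filter, PySem.Set.mem_ofList, decide_eq_true_eq, hcount]
    constructor
    · rintro ⟨h, hc⟩
      exact ⟨Or.inr h, hc⟩
    · rintro ⟨_, hc⟩
      have hn : 1 < lb.count x := by exact_mod_cast hc
      exact ⟨List.count_pos_iff.mp (by omega), hc⟩
  rw [h1, h2, h3, h4, h6, h7]

-- ===== VERDICT (by name: the statement is the Claim_ definition above) =====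
theorem process_lists_spec : Claim_equal_process_lists := by
  intro la lb ic ts _
  unfold Spec_process_lists
  exact process_lists_eq la lb ic ts
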